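-- pv_equiv track=rewrite | github.com/Scicrop/mini-rag-voice-assistant | led_matrix.py | encode_pixel
-- ===== SOURCE A (Python) =====
-- def encode_pixel(pixel):
--     """
--     Codifica um pixel (r, g, b) para WS2812 usando 3 SPI bits por bit.
--     Utiliza 0b110 para '1' e 0b100 para '0'.
--     WS2812 espera a ordem GRB.
--     Retorna uma lista de 9 bytes.
--     """
--     # Reordena para GRB
--     colors = [pixel[1], pixel[0], pixel[2]]
--     bitstring = 0
--     for color in colors:
--         for i in range(7, -1, -1):
--             bit = (color >> i) & 1
--             encoding = 0b110 if bit else 0b100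
--             bitstring = (bitstring << 3) | encoding
--     result = []
--     for i in range(9):
--         shift = 8 * (9 - i - 1)
--         byte = (bitstring >> shift) & 0xFF
--         result.append(byte)
--     return result
-- ===== SOURCE B (Python) =====
-- def encode_pixel(pixel):
--     """
--     Codifica um pixel (r, g, b) para WS2812: 3 SPI bits por bit de cor
--     (0b110 para '1', 0b100 para '0'), ordem GRB, 9 bytes no total.
--     Em vez de acumular os 72 bits num unico inteiro e depois fatia-lo,
--     emite os 3 bytes de cada cor diretamente, cor a cor.
--     """
--     result = []
--     for color in (pixel[1], pixel[0], pixel[2]):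
--         enc = 0
--         for i in range(7, -1, -1):
--             enc = (enc << 3) | (0b110 if (color >> i) & 1 else 0b100)
--         result += [(enc >> 16) & 0xFF, (enc >> 8) & 0xFF, enc & 0xFF]
--     return result
-- ===== Notes on version B (the rewrite author's own statement) =====
-- stated objective: alternative
-- what changed: B drops A's global 72-bit accumulator and its separate 9-iteration slicing pass: it encodes each GRB color into its own 24-bit value and emits that color's 3 bytes immediately, building the output chunk by chunk.
import Mathlib
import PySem

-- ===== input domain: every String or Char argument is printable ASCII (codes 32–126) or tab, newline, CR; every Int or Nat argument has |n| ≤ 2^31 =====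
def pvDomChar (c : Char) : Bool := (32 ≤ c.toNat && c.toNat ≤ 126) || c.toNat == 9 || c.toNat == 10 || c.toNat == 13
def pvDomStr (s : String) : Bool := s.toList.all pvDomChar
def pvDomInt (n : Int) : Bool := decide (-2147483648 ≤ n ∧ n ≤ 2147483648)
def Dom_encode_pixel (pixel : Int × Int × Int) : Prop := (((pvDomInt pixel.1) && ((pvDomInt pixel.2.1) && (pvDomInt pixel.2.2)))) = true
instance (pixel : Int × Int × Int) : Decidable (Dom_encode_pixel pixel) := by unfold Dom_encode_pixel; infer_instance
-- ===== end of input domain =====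

-- B replaces A's global 72-bit accumulator + separate 9-step slicing loop by
-- per-color 24-bit encodings whose 3 bytes are emitted immediately (alternative decomposition).

-- ===== PORT A =====
-- Python's << >> & | on int map to Int's <<<, >>>, PySem.Int.band/bor (exact, also on negatives).
def encode_pixel (pixel : Int × Int × Int) : List Int :=
  -- colors = [pixel[1], pixel[0], pixel[2]]
  let colors : List Int := [pixel.2.1, pixel.1, pixel.2.2]
  let bitstring : Int := colors.foldl (fun bs color =>
      (PySem.List.pyRange 7 (-1) (-1)).foldl (fun bs i =>
        let bit := PySem.Int.band (color >>> i) 1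
        let encoding : Int := if bit ≠ 0 then 6 else 4   -- 0b110 if bit else 0b100
        PySem.Int.bor (bs <<< (3 : Int)) encoding) bs) 0
  (PySem.List.pyRange 0 9 1).foldl (fun result i =>
      let shift : Int := 8 * (9 - i - 1)
      let byte := PySem.Int.band (bitstring >>> shift) 255
      result ++ [byte]) []

-- ===== PORT B =====
-- helper: the 24-bit SPI encoding of one color byte (B's inner loop)
def pvEncColor (color : Int) : Int :=
  (PySem.List.pyRange 7 (-1) (-1)).foldl (fun enc i =>
    PySem.Int.bor (enc <<< (3 : Int))
      (if PySem.Int.band (color >>> i) 1 ≠ 0 then 6 else 4)) 0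

def encode_pixel_alt (pixel : Int × Int × Int) : List Int :=
  [pixel.2.1, pixel.1, pixel.2.2].foldl (fun result color =>
    let enc := pvEncColor color
    result ++ [PySem.Int.band (enc >>> (16 : Int)) 255,
               PySem.Int.band (enc >>> (8 : Int)) 255,
               PySem.Int.band enc 255]) []

-- ===== PRECONDITION & SPEC =====
def Spec_encode_pixel (pixel : Int × Int × Int) (out : List Int) : Prop := out = encode_pixel_alt pixel
instance (pixel : Int × Int × Int) (out : List Int) : Decidable (Spec_encode_pixel pixel out) := by unfold Spec_encode_pixel; infer_instance

-- ===== CLAIM (what is proved, stated in full; the proofs are below) =====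
def Claim_equal_encode_pixel : Prop := ∀ (pixel : Int × Int × Int), Dom_encode_pixel pixel → Spec_encode_pixel pixel (encode_pixel pixel)

-- ===== LEMMAS AND PROOFS =====

-- the accumulator step shared by both inner loops, abstracted over the 3-bit atom
def pvF3 : Int → Int → Int := fun b e => PySem.Int.bor (b <<< (3 : Int)) e

-- the 3-bit atom produced for bit i of a color
def pvEat (c : Int) (i : Int) : Int := if PySem.Int.band (c >>> i) 1 ≠ 0 then 6 else 4

theorem pvNatOr4 (n : Nat) : 8*n ||| 4 = 8*n + 4 := by
  have h : 8*n = Nat.bit false (Nat.bit false (Nat.bit false n)) := by simp [Nat.bit]; ring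
  rw [h, show (4:Nat) = Nat.bit false (Nat.bit false (Nat.bit true 0)) from rfl,
     Nat.lor_bit, Nat.lor_bit, Nat.lor_bit]
  simp [Nat.bit]; ring

theorem pvNatOr6 (n : Nat) : 8*n ||| 6 = 8*n + 6 := by
  have h : 8*n = Nat.bit false (Nat.bit false (Nat.bit false n)) := by simp [Nat.bit]; ring
  rw [h, show (6:Nat) = Nat.bit false (Nat.bit true (Nat.bit true 0)) from rfl,
     Nat.lor_bit, Nat.lor_bit, Nat.lor_bit]
  simp [Nat.bit]; ring

theorem pvShl3 (bs : Int) : bs <<< (3 : Int) = 8 * bs := by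
  rw [show (3:Int) = ((3:Nat):Int) by norm_num, Int.shiftLeft_eq_mul_pow]
  norm_num; ring

theorem pvF3_step (bs e : Int) (hbs : 0 ≤ bs) (he : e = 4 ∨ e = 6) :
    pvF3 bs e = 8 * bs + e := by
  unfold pvF3
  rw [pvShl3]
  have h8 : (0:Int) ≤ 8*bs := by omega
  rcases he with rfl | rfl
  · rw [PySem.Int.bor_of_nonneg h8 (by norm_num)]
    have : (8*bs).toNat = 8 * bs.toNat := by omega
    rw [this, show ((4:Int)).toNat = 4 from rfl, pvNatOr4]
    omega
  · rw [PySem.Int.bor_of_nonneg h8 (by norm_num)]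
    have : (8*bs).toNat = 8 * bs.toNat := by omega
    rw [this, show ((6:Int)).toNat = 6 from rfl, pvNatOr6]
    omega

-- (x >> s) & 255 on a nonnegative int is floor-division then mod
theorem pvByte (m : Nat) (s : Nat) :
    PySem.Int.band (((m : Int)) >>> ((s : Nat) : Int)) 255 = ((m / 2 ^ s % 256 : Nat) : Int) := by
  rw [Int.shiftRight_natCast, show (255:Int) = ((255:Nat):Int) by norm_num,
     PySem.Int.band_natCast]
  rw [Nat.shiftRight_eq_div_pow, show (255:Nat) = 2^8-1 by norm_num,
     Nat.and_two_pow_sub_one_eq_mod]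

theorem pvByte0 (m : Nat) :
    PySem.Int.band ((m : Int)) 255 = ((m % 256 : Nat) : Int) := by
  rw [show (255:Int) = ((255:Nat):Int) by norm_num, PySem.Int.band_natCast,
     show (255:Nat) = 2^8-1 by norm_num, Nat.and_two_pow_sub_one_eq_mod]

-- the inner loop over a list of 3-bit atoms: value, bounds, and its effect on any start
theorem pvFoldE : ∀ (l : List Int), (∀ e ∈ l, e = 4 ∨ e = 6) →
    (0 ≤ l.foldl pvF3 0 ∧ l.foldl pvF3 0 < 8 ^ l.length) ∧
      ∀ bs : Int, 0 ≤ bs → l.foldl pvF3 bs = bs * 8 ^ l.length + l.foldl pvF3 0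
  | [], _ => by simp
  | e :: l, h => by
    have he : e = 4 ∨ e = 6 := h e (by simp)
    have he' : (0:Int) ≤ e ∧ e ≤ 6 := by rcases he with rfl | rfl <;> norm_num
    obtain ⟨⟨h0, hlt⟩, hgen⟩ := pvFoldE l (fun x hx => h x (by simp [hx]))
    have hp : (0:Int) < 8 ^ l.length := by positivity
    have hfold0 : (e :: l).foldl pvF3 0 = e * 8 ^ l.length + l.foldl pvF3 0 := by
      rw [List.foldl_cons, pvF3_step 0 e le_rfl he, show (8:Int) * 0 + e = e by ring,
         hgen e he'.1]
    refine ⟨⟨?_, ?_⟩, ?_⟩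
    · rw [hfold0]
      have := mul_nonneg he'.1 hp.le
      linarith
    · rw [hfold0, List.length_cons, pow_succ]
      have hkey : (6 - e) * 8 ^ l.length ≥ 0 := mul_nonneg (by linarith [he'.2]) hp.le
      nlinarith
    · intro bs hbs
      rw [List.foldl_cons, pvF3_step bs e hbs he, hgen (8*bs+e) (by linarith [he'.1]),
         hfold0, List.length_cons, pow_succ]
      ring

-- ===== VERDICT (by name: the statement is the Claim_ definition above) =====
theorem encode_pixel_spec : Claim_equal_encode_pixel := by
  intro pixel _
  obtain ⟨r, g, b⟩ := pixel
  show encode_pixel (r, g, b) = encode_pixel_alt (r, g, b)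
  have hrange : PySem.List.pyRange 7 (-1) (-1) = [7,6,5,4,3,2,1,0] := by decide
  have hrange9 : PySem.List.pyRange 0 9 1 = [0,1,2,3,4,5,6,7,8] := by decide
  have hmem : ∀ c : Int, ∀ e ∈ [(7:Int),6,5,4,3,2,1,0].map (pvEat c), e = 4 ∨ e = 6 := by
    intro c e he
    simp only [List.mem_map] at he
    obtain ⟨i, _, rfl⟩ := he
    unfold pvEat
    split
    · right; rfl
    · left; rfl
  have hEC : ∀ c : Int, pvEncColor c = ([(7:Int),6,5,4,3,2,1,0].map (pvEat c)).foldl pvF3 0 := by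
    intro c
    unfold pvEncColor
    rw [hrange]
    exact List.foldl_map.symm
  have hbound : ∀ c : Int, 0 ≤ pvEncColor c ∧ pvEncColor c < 16777216 := by
    intro c
    have h := (pvFoldE _ (hmem c)).1
    rw [hEC c]
    simpa using h
  have hstep : ∀ (c bs : Int), 0 ≤ bs →
      ([(7:Int),6,5,4,3,2,1,0]).foldl (fun bs i =>
          PySem.Int.bor (bs <<< (3:Int)) (if PySem.Int.band (c >>> i) 1 ≠ 0 then 6 else 4)) bs
        = bs * 16777216 + pvEncColor c := by
    intro c bs hbs
    have h1 : ([(7:Int),6,5,4,3,2,1,0].map (pvEat c)).foldl pvF3 bs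
        = ([(7:Int),6,5,4,3,2,1,0]).foldl (fun bs i =>
            PySem.Int.bor (bs <<< (3:Int)) (if PySem.Int.band (c >>> i) 1 ≠ 0 then 6 else 4)) bs :=
      List.foldl_map
    rw [← h1, (pvFoldE _ (hmem c)).2 bs hbs, hEC c]
    norm_num
  obtain ⟨hg0, hglt⟩ := hbound g
  obtain ⟨hr0, hrlt⟩ := hbound r
  obtain ⟨hb0, hblt⟩ := hbound b
  obtain ⟨ng, hng⟩ := Int.eq_ofNat_of_zero_le hg0
  obtain ⟨nr, hnr⟩ := Int.eq_ofNat_of_zero_le hr0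
  obtain ⟨nb, hnb⟩ := Int.eq_ofNat_of_zero_le hb0
  have hnglt : ng < 16777216 := by omega
  have hnrlt : nr < 16777216 := by omega
  have hnblt : nb < 16777216 := by omega
  -- A's accumulated 72-bit integer, as a single Nat cast
  have hbits : List.foldl (fun bs color =>
        List.foldl (fun bs i => PySem.Int.bor (bs <<< (3:Int))
          (if PySem.Int.band (color >>> i) 1 ≠ 0 then 6 else 4)) bs [7,6,5,4,3,2,1,0]) 0 [g, r, b]
      = (((ng*16777216+nr)*16777216+nb : Nat) : Int) := by
    rw [List.foldl_cons, List.foldl_cons, List.foldl_cons, List.foldl_nil]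
    rw [hstep g 0 le_rfl]
    rw [hstep r (0 * 16777216 + pvEncColor g) (by linarith)]
    rw [hstep b ((0 * 16777216 + pvEncColor g) * 16777216 + pvEncColor r)
        (by linarith [mul_nonneg hg0 (by norm_num : (0:Int) ≤ 16777216)])]
    rw [hng, hnr, hnb]
    push_cast
    ring
  simp only [encode_pixel, encode_pixel_alt, hrange, hrange9]
  rw [hbits]
  simp only [List.foldl_cons, List.foldl_nil, List.nil_append, List.cons_append]
  rw [hng, hnr, hnb]
  rw [show (8 * (9 - (0:Int) - 1)) = ((64:Nat):Int) by norm_num,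
      show (8 * (9 - (1:Int) - 1)) = ((56:Nat):Int) by norm_num,
      show (8 * (9 - (2:Int) - 1)) = ((48:Nat):Int) by norm_num,
      show (8 * (9 - (3:Int) - 1)) = ((40:Nat):Int) by norm_num,
      show (8 * (9 - (4:Int) - 1)) = ((32:Nat):Int) by norm_num,
      show (8 * (9 - (5:Int) - 1)) = ((24:Nat):Int) by norm_num,
      show (8 * (9 - (6:Int) - 1)) = ((16:Nat):Int) by norm_num,
      show (8 * (9 - (7:Int) - 1)) = ((8:Nat):Int) by norm_num,
      show (8 * (9 - (8:Int) - 1)) = ((0:Nat):Int) by norm_num,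
      show (16:Int) = ((16:Nat):Int) by norm_num,
      show ((8:Int)) = ((8:Nat):Int) by norm_num]
  simp only [pvByte, pvByte0]
  simp only [List.cons.injEq, and_true, Int.natCast_inj,
    show (2:Nat)^64 = 18446744073709551616 by norm_num,
    show (2:Nat)^56 = 72057594037927936 by norm_num,
    show (2:Nat)^48 = 281474976710656 by norm_num,
    show (2:Nat)^40 = 1099511627776 by norm_num,
    show (2:Nat)^32 = 4294967296 by norm_num,
    show (2:Nat)^24 = 16777216 by norm_num,
    show (2:Nat)^16 = 65536 by norm_num,
    show (2:Nat)^8 = 256 by norm_num,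
    show (2:Nat)^0 = 1 by norm_num]
  omega
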